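-- pv_equiv track=rewrite | github.com/opencog/link-grammar | data/th/scripts/list_multipos.py | cluster_postags
-- ===== SOURCE A (Python) =====
-- def cluster_postags(wordtbl):
--     clstbl = {}
--     for word in wordtbl:
--         cls = frozenset(wordtbl[word])
--         if cls not in clstbl:
--             clstbl[cls] = set()
--         clstbl[cls].add(word)
--     return clstbl
-- ===== SOURCE B (Python) =====
-- def cluster_postags(wordtbl):
--     # two passes: first collect the distinct tag-sets in first-occurrence order,
--     # then build each cluster by filtering the whole table for that tag-set
--     order = []
--     for word in wordtbl:
--         k = frozenset(wordtbl[word])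
--         if k not in order:
--             order.append(k)
--     return {k: {w for w in wordtbl if frozenset(wordtbl[w]) == k} for k in order}
-- ===== Notes on version B (the rewrite author's own statement) =====
-- stated objective: alternative
-- what changed: Replaces A's incremental dict-of-sets insertion with a two-pass scheme: first dedup the tag-sets in first-occurrence order, then build each cluster by one filtering pass over the table per distinct tag-set.
import Mathlib
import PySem

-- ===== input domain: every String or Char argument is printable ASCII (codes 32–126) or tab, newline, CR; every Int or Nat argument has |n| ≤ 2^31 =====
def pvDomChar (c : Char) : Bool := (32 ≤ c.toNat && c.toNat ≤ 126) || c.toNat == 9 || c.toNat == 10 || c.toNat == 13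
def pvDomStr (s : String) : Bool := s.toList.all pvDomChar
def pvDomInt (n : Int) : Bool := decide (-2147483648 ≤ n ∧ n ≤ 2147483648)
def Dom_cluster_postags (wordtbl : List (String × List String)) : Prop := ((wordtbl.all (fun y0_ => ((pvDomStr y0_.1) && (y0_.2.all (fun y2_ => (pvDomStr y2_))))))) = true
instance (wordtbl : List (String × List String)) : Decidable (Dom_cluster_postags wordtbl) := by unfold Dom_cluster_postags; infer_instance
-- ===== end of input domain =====

-- B groups the table in two passes (dedup the tag-sets, then one filter per distinct tag-set)
-- instead of A's incremental dict-of-sets insertion; an alternative decomposition (one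
-- filtering pass per distinct tag-set, so it costs more when there are many clusters).
-- The dict argument is received as an association list; both ports read it through
-- PySem.Dict.ofList (Python's dict(pairs): first position, last value), so they are
-- faithful even when the list carries duplicate word keys.

-- ===== PORT A =====
-- frozenset keys compare by set equality, so the dict keyed by frozensets is an
-- association list whose lookups use PySem.Set.equal (exact for frozenset ==).
def cluster_postags (wordtbl : List (String × List String)) : List (List String × List String) :=
  (PySem.Dict.ofList wordtbl).items.foldl (fun clstbl p =>
    let cls : PySem.Set String := PySem.Set.ofList p.2
    let clstbl' := if clstbl.any (fun e => PySem.Set.equal e.1 cls) then clstbl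
                   else clstbl ++ [(cls, ([] : PySem.Set String))]
    clstbl'.map (fun e => if PySem.Set.equal e.1 cls then (e.1, PySem.Set.add e.2 p.1) else e)) []

-- ===== PORT B =====
def cluster_postags_alt (wordtbl : List (String × List String)) : List (List String × List String) :=
  let items := (PySem.Dict.ofList wordtbl).items
  let order := items.foldl (fun ord p =>
      let k : PySem.Set String := PySem.Set.ofList p.2
      if ord.any (fun k' => PySem.Set.equal k' k) then ord else ord ++ [k]) []
  order.map (fun k => (k, PySem.Set.ofList
      ((items.filter (fun p => PySem.Set.equal (PySem.Set.ofList p.2) k)).map Prod.fst)))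

-- ===== PRECONDITION & SPEC =====
def Spec_cluster_postags (wordtbl : List (String × List String)) (out : List (List String × List String)) : Prop := out = cluster_postags_alt wordtbl
instance (wordtbl : List (String × List String)) (out : List (List String × List String)) : Decidable (Spec_cluster_postags wordtbl out) := by unfold Spec_cluster_postags; infer_instance

-- ===== CLAIM (what is proved, stated in full; the proofs are below) =====
def Claim_equal_cluster_postags : Prop := ∀ (wordtbl : List (String × List String)), Dom_cluster_postags wordtbl → Spec_cluster_postags wordtbl (cluster_postags wordtbl)

-- ===== LEMMAS AND PROOFS =====

-- A's loop body
def cpStep (clstbl : List (List String × List String)) (p : String × List String) :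
    List (List String × List String) :=
  let cls : PySem.Set String := PySem.Set.ofList p.2
  let clstbl' := if clstbl.any (fun e => PySem.Set.equal e.1 cls) then clstbl
                 else clstbl ++ [(cls, ([] : PySem.Set String))]
  clstbl'.map (fun e => if PySem.Set.equal e.1 cls then (e.1, PySem.Set.add e.2 p.1) else e)

-- the distinct new tag-sets of l, given the tag-sets already seen
def cpOrd (l : List (String × List String)) (seen : List (List String)) : List (List String) :=
  match l with
  | [] => []
  | p :: l =>
    let k : PySem.Set String := PySem.Set.ofList p.2
    if seen.any (fun k' => PySem.Set.equal k' k) then cpOrd l seen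
    else k :: cpOrd l (seen ++ [k])

def cpWords (l : List (String × List String)) (k : List String) : List String :=
  (l.filter (fun p => PySem.Set.equal (PySem.Set.ofList p.2) k)).map Prod.fst

-- closed form of A's fold from an arbitrary accumulator
def cpG (acc : List (List String × List String)) (l : List (String × List String)) :
    List (List String × List String) :=
  acc.map (fun e => (e.1,
      (l.filter (fun p => PySem.Set.equal (PySem.Set.ofList p.2) e.1)).foldl
        (fun s p => PySem.Set.add s p.1) e.2))
  ++ (cpOrd l (acc.map Prod.fst)).map (fun k => (k, PySem.Set.ofList (cpWords l k)))

theorem cp_equal_refl (s : List String) : PySem.Set.equal s s = true := by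
  rw [PySem.Set.equal_iff]; intro x; rfl

theorem cp_equal_symm {s t : List String} (h : PySem.Set.equal s t = true) :
    PySem.Set.equal t s = true := by
  rw [PySem.Set.equal_iff] at h ⊢; intro x; exact (h x).symm

theorem cp_equal_trans {s t u : List String} (h1 : PySem.Set.equal s t = true)
    (h2 : PySem.Set.equal t u = true) : PySem.Set.equal s u = true := by
  rw [PySem.Set.equal_iff] at h1 h2 ⊢; intro x; exact (h1 x).trans (h2 x)

theorem cp_mem_ordF {l : List (String × List String)} {seen : List (List String)}
    {k' : List String} (hk : k' ∈ cpOrd l seen) :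
    ∀ s ∈ seen, PySem.Set.equal s k' = false := by
  induction l generalizing seen with
  | nil => simp [cpOrd] at hk
  | cons p l ih =>
    simp only [cpOrd] at hk
    by_cases hc : seen.any (fun k'' => PySem.Set.equal k'' (PySem.Set.ofList p.2)) = true
    · rw [if_pos hc] at hk
      exact ih hk
    · rw [if_neg hc] at hk
      rcases List.mem_cons.mp hk with hke | hk
      · subst hke
        intro s hs
        rcases Bool.eq_false_or_eq_true (PySem.Set.equal s (PySem.Set.ofList p.2)) with h | h
        · exact absurd (List.any_eq_true.mpr ⟨s, hs, h⟩) hc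
        · exact h
      · intro s hs
        exact ih hk s (by simp [hs])

theorem cp_foldl_ord (l : List (String × List String)) (ord0 : List (List String)) :
    l.foldl (fun ord p =>
      let k : PySem.Set String := PySem.Set.ofList p.2
      if ord.any (fun k' => PySem.Set.equal k' k) then ord else ord ++ [k]) ord0
    = ord0 ++ cpOrd l ord0 := by
  induction l generalizing ord0 with
  | nil => simp [cpOrd]
  | cons p l ih =>
    simp only [List.foldl_cons, cpOrd]
    by_cases hc : ord0.any (fun k'' => PySem.Set.equal k'' (PySem.Set.ofList p.2)) = true
    · rw [if_pos hc, if_pos hc]; exact ih ord0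
    · rw [if_neg hc, if_neg hc, ih (ord0 ++ [PySem.Set.ofList p.2])]
      simp

theorem cp_add_nil (x : String) : PySem.Set.add ([] : PySem.Set String) x = [x] := rfl

theorem cp_ofList_cons_words (x : String) (r : List (String × List String)) :
    PySem.Set.ofList (x :: r.map Prod.fst) = r.foldl (fun s p => PySem.Set.add s p.1) [x] := by
  rw [PySem.Set.ofList_eq_foldl, List.foldl_cons, cp_add_nil, List.foldl_map]

theorem cp_step_has {acc : List (List String × List String)} {p : String × List String}
    (h : acc.any (fun e => PySem.Set.equal e.1 (PySem.Set.ofList p.2)) = true) :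
    cpStep acc p = acc.map (fun e =>
      if PySem.Set.equal e.1 (PySem.Set.ofList p.2) then (e.1, PySem.Set.add e.2 p.1) else e) := by
  simp only [cpStep, h, if_true]

theorem cp_step_not {acc : List (List String × List String)} {p : String × List String}
    (h : acc.any (fun e => PySem.Set.equal e.1 (PySem.Set.ofList p.2)) = false)
    (hall : ∀ e ∈ acc, PySem.Set.equal e.1 (PySem.Set.ofList p.2) = false) :
    cpStep acc p = acc ++ [(PySem.Set.ofList p.2, [p.1])] := by
  simp only [cpStep, h, Bool.false_eq_true, if_false, List.map_append]
  rw [List.map_congr_left (g := id) (fun e he => by rw [if_neg (by simp [hall e he])]; rfl)]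
  simp [cp_equal_refl]

theorem cp_main (l : List (String × List String)) (acc : List (List String × List String)) :
    l.foldl cpStep acc = cpG acc l := by
  induction l generalizing acc with
  | nil => simp [cpG, cpOrd, cpWords]
  | cons p l ih =>
    rw [List.foldl_cons, ih]
    by_cases hc : acc.any (fun e => PySem.Set.equal e.1 (PySem.Set.ofList p.2)) = true
    · -- the tag-set of p is already a key of acc
      have hfst : (cpStep acc p).map Prod.fst = acc.map Prod.fst := by
        rw [cp_step_has hc, List.map_map]
        refine List.map_congr_left (fun e he => ?_)
        by_cases he1 : PySem.Set.equal e.1 (PySem.Set.ofList p.2) = true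
        · simp [he1]
        · simp [he1]
      have hcond : ((acc.map Prod.fst).any fun k' => PySem.Set.equal k' (PySem.Set.ofList p.2)) = true := by
        rw [List.any_map]; exact hc
      obtain ⟨e0, he0, he0eq⟩ := List.any_eq_true.mp hc
      unfold cpG
      rw [hfst]
      simp only [cpOrd, hcond, if_true]
      congr 1
      · -- accumulator part
        rw [cp_step_has hc, List.map_map]
        refine List.map_congr_left (fun e he => ?_)
        by_cases he1 : PySem.Set.equal e.1 (PySem.Set.ofList p.2) = true
        · have hsym : PySem.Set.equal (PySem.Set.ofList p.2) e.1 = true := cp_equal_symm he1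
          simp [he1, hsym]
        · have hsym : PySem.Set.equal (PySem.Set.ofList p.2) e.1 = false := by
            rcases Bool.eq_false_or_eq_true (PySem.Set.equal (PySem.Set.ofList p.2) e.1) with h | h
            · exact absurd (cp_equal_symm h) he1
            · exact h
          simp [he1, hsym]
      · -- new-keys part
        refine List.map_congr_left (fun k' hk' => ?_)
        have hne : PySem.Set.equal (PySem.Set.ofList p.2) k' = false := by
          rcases Bool.eq_false_or_eq_true (PySem.Set.equal (PySem.Set.ofList p.2) k') with h | h
          · have : PySem.Set.equal e0.1 k' = true := cp_equal_trans he0eq h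
            have hf := cp_mem_ordF hk' e0.1 (List.mem_map_of_mem he0)
            simp [this] at hf
          · exact h
        simp [cpWords, hne]
    · -- new tag-set: a fresh entry is appended
      have hcf : acc.any (fun e => PySem.Set.equal e.1 (PySem.Set.ofList p.2)) = false := by
        simpa using hc
      have hall : ∀ e ∈ acc, PySem.Set.equal e.1 (PySem.Set.ofList p.2) = false := by
        intro e he
        exact Bool.eq_false_iff.mpr (List.any_eq_false.mp hcf e he)
      have hcond : ((acc.map Prod.fst).any fun k' => PySem.Set.equal k' (PySem.Set.ofList p.2)) = false := by
        rw [List.any_map]; exact hcf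
      rw [cp_step_not hcf hall]
      unfold cpG
      simp only [cpOrd, hcond, Bool.false_eq_true, if_false, List.map_append, List.map_cons]
      rw [List.append_assoc]
      congr 1
      · -- old entries keep their value folds
        refine List.map_congr_left (fun e he => ?_)
        have hsym : PySem.Set.equal (PySem.Set.ofList p.2) e.1 = false := by
          rcases Bool.eq_false_or_eq_true (PySem.Set.equal (PySem.Set.ofList p.2) e.1) with h | h
          · exact absurd (cp_equal_symm h) (by simp [hall e he])
          · exact h
        simp [hsym]
      · -- the fresh entry plus the remaining new keys
        simp only [List.map_nil, List.singleton_append, List.cons.injEq]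
        constructor
        · -- fresh entry: foldl add from [p.1] is ofList of p.1 :: matched words
          have hw : cpWords (p :: l) (PySem.Set.ofList p.2) = p.1 :: cpWords l (PySem.Set.ofList p.2) := by
            simp [cpWords, cp_equal_refl]
          rw [hw, cpWords, cp_ofList_cons_words]
        · -- remaining new keys: p does not match any of them
          refine List.map_congr_left (fun k' hk' => ?_)
          have hne : PySem.Set.equal (PySem.Set.ofList p.2) k' = false := by
            have hf := cp_mem_ordF hk' (PySem.Set.ofList p.2) (by simp)
            exact hf
          simp [cpWords, hne]

theorem cluster_postags_spec : Claim_equal_cluster_postags := by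
  intro wordtbl _
  unfold Spec_cluster_postags
  have hA : cluster_postags wordtbl = (PySem.Dict.ofList wordtbl).items.foldl cpStep [] := rfl
  have hB : cluster_postags_alt wordtbl =
      ((PySem.Dict.ofList wordtbl).items.foldl (fun ord p =>
          let k : PySem.Set String := PySem.Set.ofList p.2
          if ord.any (fun k' => PySem.Set.equal k' k) then ord else ord ++ [k]) []).map
        (fun k => (k, PySem.Set.ofList
          (((PySem.Dict.ofList wordtbl).items.filter
              (fun p => PySem.Set.equal (PySem.Set.ofList p.2) k)).map Prod.fst))) := rfl
  rw [hA, hB, cp_main, cp_foldl_ord]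
  simp [cpG, cpWords]
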